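-- pv_equiv track=rewrite | github.com/ChenCao2016/WLAN_PHY_PythonModule | ChannelCoding.py | BCCEncoder
-- ===== SOURCE A (Python) =====
-- def BCCEncoder(input, rate):
--
--     output = []
--     ShiftRegister = [0, 0, 0, 0, 0, 0, 0]
--     BitStreamLen = len(input)
--
--     #if rate == "1/2": (default)
--     MaskLen = 1
--     PunctureMaskA = [1]
--     PunctureMaskB = [1]
--
--     if rate == "3/4":
--         MaskLen = 8
--         PunctureMaskA = [1, 1, 0, 1, 1, 0, 1, 1, 0]
--         PunctureMaskB = [1, 0, 1, 1, 0, 1, 1, 0, 1]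
--
--     if rate == "2/3":
--         MaskLen = 6
--         PunctureMaskA = [1, 1, 1, 1, 1, 1]
--         PunctureMaskB = [1, 0, 1, 0, 1, 0]
--
--     MaskCounter = 0
--     for i in range(BitStreamLen):
--
--         for j in range(6, 0, -1):
--             ShiftRegister[j] = ShiftRegister[j-1]
--         ShiftRegister[0] = input[i]
--         a = ShiftRegister[0] ^ ShiftRegister[2] ^ ShiftRegister[3] ^ ShiftRegister[5] ^ ShiftRegister[6]
--         b = ShiftRegister[0] ^ ShiftRegister[1] ^ ShiftRegister[2] ^ ShiftRegister[3] ^ ShiftRegister[6]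
--
--         if PunctureMaskA[MaskCounter] == 1:
--             output.append(a)
--
--         if PunctureMaskB[MaskCounter] == 1:
--             output.append(b)
--
--         MaskCounter = (MaskCounter+1) % MaskLen
--
--     return output
-- ===== SOURCE B (Python) =====
-- def BCCEncoder(input, rate):
--     # Two-stage "generate then puncture": build both full coded streams by
--     # xor-ing delayed copies of the input, interleave them, then keep bits
--     # selected by one periodic mask.
--     n = len(input)
--
--     def delayed(k):
--         return ([0] * k + input)[:n]
--
--     def xor2(u, v):
--         return [x ^ y for x, y in zip(u, v)]
--
--     streamA = xor2(xor2(xor2(xor2(delayed(0), delayed(2)), delayed(3)), delayed(5)), delayed(6))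
--     streamB = xor2(xor2(xor2(xor2(delayed(0), delayed(1)), delayed(2)), delayed(3)), delayed(6))
--
--     if rate == "3/4":
--         L, maskA, maskB = 8, [1, 1, 0, 1, 1, 0, 1, 1, 0], [1, 0, 1, 1, 0, 1, 1, 0, 1]
--     elif rate == "2/3":
--         L, maskA, maskB = 6, [1, 1, 1, 1, 1, 1], [1, 0, 1, 0, 1, 0]
--     else:
--         L, maskA, maskB = 1, [1], [1]
--
--     interleaved = [v for ab in zip(streamA, streamB) for v in ab]
--     keep = [m for j in range(L) for m in (maskA[j], maskB[j])]
--     return [v for i, v in enumerate(interleaved) if keep[i % (2 * L)]]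
-- ===== Notes on version B (the rewrite author's own statement) =====
-- stated objective: alternative
-- what changed: Replaces A's per-bit shift-register loop (register shifted in place, taps read from it, MaskCounter state) by a staged generate-then-puncture pipeline: both coded streams are built whole by xor-ing delayed copies of the input, interleaved, and then filtered once by a periodic keep-mask.
import Mathlib
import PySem

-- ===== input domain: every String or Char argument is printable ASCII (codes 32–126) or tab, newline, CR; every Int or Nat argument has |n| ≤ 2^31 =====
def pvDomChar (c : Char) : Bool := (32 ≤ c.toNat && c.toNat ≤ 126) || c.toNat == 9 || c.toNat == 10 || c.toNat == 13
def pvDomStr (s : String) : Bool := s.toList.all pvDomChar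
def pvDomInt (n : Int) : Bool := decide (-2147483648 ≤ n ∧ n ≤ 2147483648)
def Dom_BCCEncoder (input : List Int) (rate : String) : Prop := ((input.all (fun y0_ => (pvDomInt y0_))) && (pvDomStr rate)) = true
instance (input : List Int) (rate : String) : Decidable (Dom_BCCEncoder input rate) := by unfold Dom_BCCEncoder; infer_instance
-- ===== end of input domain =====

-- B replaces A's bit-at-a-time shift-register loop by a staged pipeline: xor of delayed
-- copies of the input builds both coded streams, which are interleaved and then punctured
-- by one periodic keep-mask (objective: alternative decomposition, same cost).


-- ===== PORT A =====
-- A's mask selection: default 1/2, then the two sequential if-statements.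
def pvMasksA (rate : String) : Int × List Int × List Int :=
  let m : Int × List Int × List Int := (1, [1], [1])
  let m := if rate = "3/4" then ((8 : Int), ([1, 1, 0, 1, 1, 0, 1, 1, 0] : List Int), ([1, 0, 1, 1, 0, 1, 1, 0, 1] : List Int)) else m
  let m := if rate = "2/3" then ((6 : Int), ([1, 1, 1, 1, 1, 1] : List Int), ([1, 0, 1, 0, 1, 0] : List Int)) else m
  m

-- one iteration of A's main loop: state = (ShiftRegister, MaskCounter, output)
def pvStepA (PA PB : List Int) (L : Int) (s : List Int × Int × List Int) (xi : Int) : List Int × Int × List Int :=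
  let reg := (PySem.List.pyRange 6 0 (-1)).foldl
      (fun r j => PySem.List.pySetD r j (PySem.List.pyGetD r (j - 1) 0)) s.1
  let reg := PySem.List.pySetD reg 0 xi
  let a := PySem.Int.bxor (PySem.Int.bxor (PySem.Int.bxor (PySem.Int.bxor
      (PySem.List.pyGetD reg 0 0) (PySem.List.pyGetD reg 2 0)) (PySem.List.pyGetD reg 3 0))
      (PySem.List.pyGetD reg 5 0)) (PySem.List.pyGetD reg 6 0)
  let b := PySem.Int.bxor (PySem.Int.bxor (PySem.Int.bxor (PySem.Int.bxor
      (PySem.List.pyGetD reg 0 0) (PySem.List.pyGetD reg 1 0)) (PySem.List.pyGetD reg 2 0))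
      (PySem.List.pyGetD reg 3 0)) (PySem.List.pyGetD reg 6 0)
  let out := if PySem.List.pyGet? PA s.2.1 = some 1 then s.2.2 ++ [a] else s.2.2
  let out := if PySem.List.pyGet? PB s.2.1 = some 1 then out ++ [b] else out
  (reg, PySem.Int.mod (s.2.1 + 1) L, out)

def BCCEncoder (input : List Int) (rate : String) : List Int :=
  let m := pvMasksA rate
  (input.foldl (pvStepA m.2.1 m.2.2 m.1) ([0, 0, 0, 0, 0, 0, 0], 0, [])).2.2

-- ===== PORT B =====
-- ([0] * k + input)[:n]
def pvDelayed (input : List Int) (k : Nat) : List Int :=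
  PySem.List.slice (List.replicate k 0 ++ input) none (some (input.length : Int))

-- [x ^ y for x, y in zip(u, v)]
def pvXor2 (u v : List Int) : List Int :=
  (u.zip v).map (fun p => PySem.Int.bxor p.1 p.2)

-- the streamA / streamB lines of Source B
def pvStreamA (input : List Int) : List Int :=
  pvXor2 (pvXor2 (pvXor2 (pvXor2 (pvDelayed input 0) (pvDelayed input 2)) (pvDelayed input 3)) (pvDelayed input 5)) (pvDelayed input 6)
def pvStreamB (input : List Int) : List Int :=
  pvXor2 (pvXor2 (pvXor2 (pvXor2 (pvDelayed input 0) (pvDelayed input 1)) (pvDelayed input 2)) (pvDelayed input 3)) (pvDelayed input 6)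

-- B's mask selection: if/elif/else
def pvMasksB (rate : String) : Int × List Int × List Int :=
  if rate = "3/4" then ((8 : Int), ([1, 1, 0, 1, 1, 0, 1, 1, 0] : List Int), ([1, 0, 1, 1, 0, 1, 1, 0, 1] : List Int))
  else if rate = "2/3" then ((6 : Int), ([1, 1, 1, 1, 1, 1] : List Int), ([1, 0, 1, 0, 1, 0] : List Int))
  else ((1 : Int), ([1] : List Int), ([1] : List Int))

-- [v for ab in zip(streamA, streamB) for v in ab]
def pvInterleave (u v : List Int) : List Int :=
  (u.zip v).flatMap (fun p => [p.1, p.2])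

-- [m for j in range(L) for m in (maskA[j], maskB[j])]
def pvKeep (PA PB : List Int) (L : Int) : List Int :=
  (PySem.List.pyRange 0 L 1).flatMap (fun j => [PySem.List.pyGetD PA j 0, PySem.List.pyGetD PB j 0])

def BCCEncoder_alt (input : List Int) (rate : String) : List Int :=
  let m := pvMasksB rate
  let keep := pvKeep m.2.1 m.2.2 m.1
  (PySem.List.enumerate (pvInterleave (pvStreamA input) (pvStreamB input)) 0).filterMap
    (fun p => if PySem.List.pyGetD keep (PySem.Int.mod p.1 (2 * m.1)) 0 ≠ 0 then some p.2 else none)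

-- ===== PRECONDITION & SPEC =====
def Spec_BCCEncoder (input : List Int) (rate : String) (out : List Int) : Prop := out = BCCEncoder_alt input rate
instance (input : List Int) (rate : String) (out : List Int) : Decidable (Spec_BCCEncoder input rate out) := by unfold Spec_BCCEncoder; infer_instance

-- ===== CLAIM (what is proved, stated in full; the proofs are below) =====
def Claim_equal_BCCEncoder : Prop := ∀ (input : List Int) (rate : String), Dom_BCCEncoder input rate → Spec_BCCEncoder input rate (BCCEncoder input rate)

-- ===== LEMMAS AND PROOFS =====

-- input[j] if j >= 0 else 0 (proof-side tap; the common reference both ports reduce to)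
def pvX (input : List Int) (j : Int) : Int :=
  if 0 ≤ j then (PySem.List.pyGet? input j).getD 0 else 0

-- proof-side reference loop body: per-index step carrying only the output
def pvStepB (input PA PB : List Int) (L : Int) (out : List Int) (i : Int) : List Int :=
  let a := PySem.Int.bxor (PySem.Int.bxor (PySem.Int.bxor (PySem.Int.bxor
      (pvX input i) (pvX input (i - 2))) (pvX input (i - 3))) (pvX input (i - 5))) (pvX input (i - 6))
  let b := PySem.Int.bxor (PySem.Int.bxor (PySem.Int.bxor (PySem.Int.bxor
      (pvX input i) (pvX input (i - 1))) (pvX input (i - 2))) (pvX input (i - 3))) (pvX input (i - 6))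
  let m := PySem.Int.mod i L
  let out := if (PySem.List.pyGet? PA m).getD 0 ≠ 0 then out ++ [a] else out
  if (PySem.List.pyGet? PB m).getD 0 ≠ 0 then out ++ [b] else out

-- the two mask selections agree
lemma pvMasks_eq (rate : String) : pvMasksA rate = pvMasksB rate := by
  unfold pvMasksA pvMasksB
  by_cases h34 : rate = "3/4"
  · subst h34; simp
  · by_cases h23 : rate = "2/3"
    · subst h23; simp
    · simp [h34, h23]

-- A's inner shifting loop followed by the head write, on a 7-cell register
lemma pvShift_eq (r0 r1 r2 r3 r4 r5 r6 xi : Int) :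
    PySem.List.pySetD
      ((PySem.List.pyRange 6 0 (-1)).foldl
        (fun r j => PySem.List.pySetD r j (PySem.List.pyGetD r (j - 1) 0))
        [r0, r1, r2, r3, r4, r5, r6]) 0 xi
      = [xi, r0, r1, r2, r3, r4, r5] := by
  rw [show PySem.List.pyRange 6 0 (-1) = [6, 5, 4, 3, 2, 1] from by decide]
  simp [PySem.List.pySetD, PySem.List.pySet?, PySem.List.pyGetD, PySem.List.pyGet?,
    PySem.List.pyIdx?]

-- the tap ignores a just-appended element at lower indices
lemma pvX_append (l : List Int) (v : Int) (j : Int) (hj : j < (l.length : Int)) :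
    pvX (l ++ [v]) j = pvX l j := by
  unfold pvX
  by_cases h0 : 0 ≤ j
  · simp only [if_pos h0]
    rw [PySem.List.pyGet?_of_nonneg _ h0, PySem.List.pyGet?_of_nonneg _ h0,
      List.getElem?_append_left (by omega)]
  · simp [h0]

-- the tap at the index of the just-appended element
lemma pvX_append_self (l : List Int) (v : Int) :
    pvX (l ++ [v]) (l.length : Int) = v := by
  unfold pvX
  rw [if_pos (by positivity)]
  rw [show (l ++ [v] : List Int) = l ++ v :: [] from rfl, PySem.List.pyGet?_append_length]
  rfl

-- mask entries are 0/1, so A's "== 1" test and B's truthiness test agree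
lemma pvMask_cond (PA : List Int) (r : Int) (h01 : ∀ y ∈ PA, y = 0 ∨ y = 1)
    (hr0 : 0 ≤ r) (hr : r < (PA.length : Int)) :
    (PySem.List.pyGet? PA r = some 1) ↔ ((PySem.List.pyGet? PA r).getD 0 ≠ 0) := by
  rw [PySem.List.pyGet?_eq_some_getElem PA hr0 hr]
  have hm : PA[r.toNat] ∈ PA := List.getElem_mem _
  rcases h01 _ hm with h | h <;> simp [h]

-- counter step: (c % L + 1) % L = (c + 1) % L for positive L
lemma pvMod_step (c L : Int) (hL : 0 < L) :
    PySem.Int.mod (PySem.Int.mod c L + 1) L = PySem.Int.mod (c + 1) L := by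
  rw [PySem.Int.mod_eq_emod_of_pos hL, PySem.Int.mod_eq_emod_of_pos hL,
    PySem.Int.mod_eq_emod_of_pos hL, Int.add_emod c 1 L, Int.add_emod (c % L) 1 L,
    Int.emod_emod_of_dvd _ dvd_rfl]

-- reading the 7-cell register at the tap positions
lemma pvReg0 (e0 e1 e2 e3 e4 e5 e6 : Int) : PySem.List.pyGetD [e0, e1, e2, e3, e4, e5, e6] 0 0 = e0 := rfl
lemma pvReg1 (e0 e1 e2 e3 e4 e5 e6 : Int) : PySem.List.pyGetD [e0, e1, e2, e3, e4, e5, e6] 1 0 = e1 := rfl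
lemma pvReg2 (e0 e1 e2 e3 e4 e5 e6 : Int) : PySem.List.pyGetD [e0, e1, e2, e3, e4, e5, e6] 2 0 = e2 := rfl
lemma pvReg3 (e0 e1 e2 e3 e4 e5 e6 : Int) : PySem.List.pyGetD [e0, e1, e2, e3, e4, e5, e6] 3 0 = e3 := rfl
lemma pvReg5 (e0 e1 e2 e3 e4 e5 e6 : Int) : PySem.List.pyGetD [e0, e1, e2, e3, e4, e5, e6] 5 0 = e5 := rfl
lemma pvReg6 (e0 e1 e2 e3 e4 e5 e6 : Int) : PySem.List.pyGetD [e0, e1, e2, e3, e4, e5, e6] 6 0 = e6 := rfl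

-- main invariant on A's side: A's fold over the input equals (register window, counter, reference output)
lemma pvCore (PA PB : List Int) (L : Int) (hL : 0 < L)
    (hPA : L ≤ (PA.length : Int)) (hPB : L ≤ (PB.length : Int))
    (hA01 : ∀ y ∈ PA, y = 0 ∨ y = 1) (hB01 : ∀ y ∈ PB, y = 0 ∨ y = 1)
    (input : List Int) :
    input.foldl (pvStepA PA PB L) ([0, 0, 0, 0, 0, 0, 0], 0, [])
      = ([pvX input ((input.length : Int) - 1), pvX input ((input.length : Int) - 2),
          pvX input ((input.length : Int) - 3), pvX input ((input.length : Int) - 4),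
          pvX input ((input.length : Int) - 5), pvX input ((input.length : Int) - 6),
          pvX input ((input.length : Int) - 7)],
         PySem.Int.mod (input.length : Int) L,
         (PySem.List.pyRange 0 (input.length : Int) 1).foldl (pvStepB input PA PB L) []) := by
  induction input using List.reverseRecOn with
  | nil =>
      simp [pvX, PySem.Int.mod_eq_emod_of_pos hL, PySem.List.pyRange_one_eq_nil (le_refl 0)]
  | append_singleton l v ih =>
      have hn : (0 : Int) ≤ (l.length : Int) := by positivity
      have hxv : pvX (l ++ [v]) (l.length : Int) = v := pvX_append_self l v
      have hx : ∀ k : Int, k < (l.length : Int) → pvX (l ++ [v]) k = pvX l k :=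
        fun k hk => pvX_append l v k hk
      have hr0 : 0 ≤ PySem.Int.mod (l.length : Int) L := PySem.Int.mod_nonneg _ hL
      have hrL : PySem.Int.mod (l.length : Int) L < L := PySem.Int.mod_lt _ hL
      have hcA : (PySem.List.pyGet? PA (PySem.Int.mod (l.length : Int) L) = some 1)
          = ((PySem.List.pyGet? PA (PySem.Int.mod (l.length : Int) L)).getD 0 ≠ 0) :=
        propext (pvMask_cond PA _ hA01 hr0 (lt_of_lt_of_le hrL hPA))
      have hcB : (PySem.List.pyGet? PB (PySem.Int.mod (l.length : Int) L) = some 1)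
          = ((PySem.List.pyGet? PB (PySem.Int.mod (l.length : Int) L)).getD 0 ≠ 0) :=
        propext (pvMask_cond PB _ hB01 hr0 (lt_of_lt_of_le hrL hPB))
      rw [List.foldl_append, ih]
      simp only [List.length_append, List.length_cons, List.length_nil, Nat.cast_add,
        Nat.cast_one]
      push_cast
      rw [PySem.List.pyRange_one_succ_right hn, List.foldl_append]
      rw [PySem.List.foldl_congr_mem (PySem.List.pyRange 0 (l.length : Int) 1)
        (pvStepB (l ++ [v]) PA PB L) (pvStepB l PA PB L) []
        (by
          intro acc i hi
          rcases (PySem.List.mem_pyRange_one).1 hi with ⟨hi0, hi1⟩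
          unfold pvStepB
          rw [hx i hi1, hx (i - 1) (by omega), hx (i - 2) (by omega), hx (i - 3) (by omega),
            hx (i - 5) (by omega), hx (i - 6) (by omega)])]
      simp only [List.foldl_cons, List.foldl_nil]
      simp only [pvStepA, pvStepB]
      rw [pvShift_eq, pvReg0, pvReg1, pvReg2, pvReg3, pvReg5, pvReg6]
      rw [show ((l.length : Int) + 1 - 1) = (l.length : Int) from by ring,
        show ((l.length : Int) + 1 - 2) = (l.length : Int) - 1 from by ring,
        show ((l.length : Int) + 1 - 3) = (l.length : Int) - 2 from by ring,
        show ((l.length : Int) + 1 - 4) = (l.length : Int) - 3 from by ring,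
        show ((l.length : Int) + 1 - 5) = (l.length : Int) - 4 from by ring,
        show ((l.length : Int) + 1 - 6) = (l.length : Int) - 5 from by ring,
        show ((l.length : Int) + 1 - 7) = (l.length : Int) - 6 from by ring]
      rw [hxv, hx ((l.length : Int) - 1) (by omega), hx ((l.length : Int) - 2) (by omega),
        hx ((l.length : Int) - 3) (by omega), hx ((l.length : Int) - 4) (by omega),
        hx ((l.length : Int) - 5) (by omega), hx ((l.length : Int) - 6) (by omega)]
      simp only [hcA, hcB, pvMod_step _ _ hL]

-- ----- B-side lemmas: the staged pipeline equals the same reference loop -----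

lemma pvDelayed_eq_take (input : List Int) (k : Nat) :
    pvDelayed input k = (List.replicate k 0 ++ input).take input.length := by
  unfold pvDelayed
  exact PySem.List.slice_to_natCast _ _

lemma pvDelayed_length (input : List Int) (k : Nat) :
    (pvDelayed input k).length = input.length := by
  rw [pvDelayed_eq_take]; simp

lemma pvDelayed_append (l : List Int) (v : Int) (k : Nat) :
    pvDelayed (l ++ [v]) k = pvDelayed l k ++ [pvX (l ++ [v]) ((l.length : Int) - k)] := by
  rw [pvDelayed_eq_take, pvDelayed_eq_take]
  by_cases hk : k ≤ l.length
  · have hb : l.length - k < (l ++ [v]).length := by simp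
    have hx : pvX (l ++ [v]) ((l.length : Int) - k) = (l ++ [v])[l.length - k]'hb := by
      unfold pvX
      rw [if_pos (by omega),
        show ((l.length : Int) - k) = ((l.length - k : Nat) : Int) from by omega,
        PySem.List.pyGet?_of_nonneg _ (by positivity)]
      rw [Int.toNat_natCast, List.getElem?_eq_getElem (by simp)]
      rfl
    set x := (l ++ [v])[l.length - k]'hb with hxdef
    rw [hx]
    have e1 : (List.replicate k (0:Int) ++ (l ++ [v])).take (l ++ [v]).length
        = List.replicate k 0 ++ (l ++ [v]).take (l.length + 1 - k) := by
      rw [List.take_append, List.take_replicate]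
      simp only [List.length_append, List.length_replicate, List.length_cons, List.length_nil]
      rw [show min (l.length + (0 + 1)) k = k from by omega,
          show l.length + (0 + 1) - k = l.length + 1 - k from by omega]
    have e2 : (l ++ [v]).take (l.length + 1 - k) = l.take (l.length - k) ++ [x] := by
      rw [show l.length + 1 - k = (l.length - k) + 1 from by omega, List.take_add_one]
      rw [List.take_append_of_le_length (by omega), List.getElem?_eq_getElem hb]
      rfl
    have e3 : (List.replicate k (0:Int) ++ l).take l.length
        = List.replicate k 0 ++ l.take (l.length - k) := by
      rw [List.take_append, List.take_replicate]
      rw [show min l.length k = k from by omega]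
      simp
    rw [e1, e2, e3, List.append_assoc]
  · have hx : pvX (l ++ [v]) ((l.length : Int) - k) = 0 := by
      unfold pvX; rw [if_neg (by omega)]
    rw [hx]
    rw [List.take_append_of_le_length (by simp; omega),
        List.take_append_of_le_length (by simp; omega)]
    rw [List.take_replicate, List.take_replicate]
    rw [show min (l ++ [v]).length k = (l ++ [v]).length from by simp; omega,
        show min l.length k = l.length from by omega]
    rw [show (l ++ [v]).length = l.length + 1 from by simp]
    exact List.replicate_succ' .. ▸ rfl

lemma pvXor2_append (u w : List Int) (x y : Int) (h : u.length = w.length) :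
    pvXor2 (u ++ [x]) (w ++ [y]) = pvXor2 u w ++ [PySem.Int.bxor x y] := by
  unfold pvXor2
  rw [List.zip_append (by simpa using h)]
  simp

lemma pvXor2_length (u w : List Int) : (pvXor2 u w).length = min u.length w.length := by
  simp [pvXor2]

lemma pvInterleave_append (u w : List Int) (x y : Int) (h : u.length = w.length) :
    pvInterleave (u ++ [x]) (w ++ [y]) = pvInterleave u w ++ [x, y] := by
  unfold pvInterleave
  rw [List.zip_append (by simpa using h)]
  simp

lemma pvFlat2_len (f g : Int → Int) (s : List Int) :
    (s.flatMap (fun j => [f j, g j])).length = 2 * s.length := by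
  induction s with
  | nil => simp
  | cons a t ih => simp [ih]; omega

lemma pvPairFlat_len (s : List (Int × Int)) :
    (s.flatMap (fun p => [p.1, p.2])).length = 2 * s.length := by
  induction s with
  | nil => simp
  | cons a t ih => simp [ih]; omega

lemma pvKeep_split (PA PB : List Int) (L m : Int) (h0 : 0 ≤ m) (h1 : m < L) :
    pvKeep PA PB L
      = (PySem.List.pyRange 0 m 1).flatMap (fun j => [PySem.List.pyGetD PA j 0, PySem.List.pyGetD PB j 0])
        ++ ([PySem.List.pyGetD PA m 0, PySem.List.pyGetD PB m 0]
            ++ (PySem.List.pyRange (m+1) L 1).flatMap (fun j => [PySem.List.pyGetD PA j 0, PySem.List.pyGetD PB j 0])) := by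
  unfold pvKeep
  rw [PySem.List.pyRange_one_append 0 m L h0 (by omega), PySem.List.pyRange_one_cons h1]
  simp [List.flatMap_append]

lemma pvKeep_even (PA PB : List Int) (L m : Int) (h0 : 0 ≤ m) (h1 : m < L) :
    PySem.List.pyGetD (pvKeep PA PB L) (2 * m) 0 = PySem.List.pyGetD PA m 0 := by
  rw [pvKeep_split PA PB L m h0 h1]
  have hlen : ((PySem.List.pyRange 0 m 1).flatMap (fun j => [PySem.List.pyGetD PA j 0, PySem.List.pyGetD PB j 0])).length = (2*m).toNat := by
    rw [pvFlat2_len, PySem.List.length_pyRange_one]; omega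
  rw [PySem.List.pyGetD_eq_getElem _ _ (by omega) (by simp [List.length_append, hlen]; omega)]
  rw [List.getElem_append_right (by omega)]
  simp [hlen]

lemma pvKeep_odd (PA PB : List Int) (L m : Int) (h0 : 0 ≤ m) (h1 : m < L) :
    PySem.List.pyGetD (pvKeep PA PB L) (2 * m + 1) 0 = PySem.List.pyGetD PB m 0 := by
  rw [pvKeep_split PA PB L m h0 h1]
  have hlen : ((PySem.List.pyRange 0 m 1).flatMap (fun j => [PySem.List.pyGetD PA j 0, PySem.List.pyGetD PB j 0])).length = (2*m).toNat := by
    rw [pvFlat2_len, PySem.List.length_pyRange_one]; omega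
  rw [PySem.List.pyGetD_eq_getElem _ _ (by omega) (by simp [List.length_append, hlen]; omega)]
  rw [List.getElem_append_right (by omega)]
  simp only [hlen]
  simp [show (2*m+1).toNat - (2*m).toNat = 1 from by omega]

lemma pvMod_double (n L : Int) (hL : 0 < L) :
    PySem.Int.mod (2 * n) (2 * L) = 2 * PySem.Int.mod n L := by
  rw [PySem.Int.mod_eq_emod_of_pos (by omega), PySem.Int.mod_eq_emod_of_pos hL]
  exact Int.mul_emod_mul_of_pos n L (by omega)

lemma pvMod_double_succ (n L : Int) (hL : 0 < L) :
    PySem.Int.mod (2 * n + 1) (2 * L) = 2 * PySem.Int.mod n L + 1 := by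
  rw [PySem.Int.mod_eq_emod_of_pos (by omega), PySem.Int.mod_eq_emod_of_pos hL]
  have h1 : L * (n / L) + n % L = n := Int.mul_ediv_add_emod n L
  have h2 : 0 ≤ n % L := Int.emod_nonneg n (by omega)
  have h3 : n % L < L := Int.emod_lt_of_pos n hL
  have h4 : 2 * n + 1 = 2 * (n % L) + 1 + (2 * L) * (n / L) := by
    have h5 : (2 * L) * (n / L) = 2 * (L * (n / L)) := by ring
    omega
  rw [h4, Int.add_mul_emod_self_left]
  exact Int.emod_eq_of_lt (by omega) (by omega)

lemma pvStreamA_length (input : List Int) : (pvStreamA input).length = input.length := by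
  simp [pvStreamA, pvXor2_length, pvDelayed_length]

lemma pvStreamB_length (input : List Int) : (pvStreamB input).length = input.length := by
  simp [pvStreamB, pvXor2_length, pvDelayed_length]

lemma pvStreamA_append (l : List Int) (v : Int) :
    pvStreamA (l ++ [v]) = pvStreamA l
      ++ [PySem.Int.bxor (PySem.Int.bxor (PySem.Int.bxor (PySem.Int.bxor
            (pvX (l ++ [v]) (l.length : Int)) (pvX (l ++ [v]) ((l.length : Int) - 2)))
            (pvX (l ++ [v]) ((l.length : Int) - 3))) (pvX (l ++ [v]) ((l.length : Int) - 5)))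
            (pvX (l ++ [v]) ((l.length : Int) - 6))] := by
  unfold pvStreamA
  rw [pvDelayed_append l v 0, pvDelayed_append l v 2, pvDelayed_append l v 3,
      pvDelayed_append l v 5, pvDelayed_append l v 6]
  rw [pvXor2_append _ _ _ _ (by rw [pvDelayed_length, pvDelayed_length]),
      pvXor2_append _ _ _ _ (by rw [pvXor2_length, pvDelayed_length, pvDelayed_length, pvDelayed_length]; omega),
      pvXor2_append _ _ _ _ (by rw [pvXor2_length, pvXor2_length, pvDelayed_length, pvDelayed_length, pvDelayed_length, pvDelayed_length]; omega),
      pvXor2_append _ _ _ _ (by rw [pvXor2_length, pvXor2_length, pvXor2_length, pvDelayed_length, pvDelayed_length, pvDelayed_length, pvDelayed_length, pvDelayed_length]; omega)]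
  norm_num

lemma pvStreamB_append (l : List Int) (v : Int) :
    pvStreamB (l ++ [v]) = pvStreamB l
      ++ [PySem.Int.bxor (PySem.Int.bxor (PySem.Int.bxor (PySem.Int.bxor
            (pvX (l ++ [v]) (l.length : Int)) (pvX (l ++ [v]) ((l.length : Int) - 1)))
            (pvX (l ++ [v]) ((l.length : Int) - 2))) (pvX (l ++ [v]) ((l.length : Int) - 3)))
            (pvX (l ++ [v]) ((l.length : Int) - 6))] := by
  unfold pvStreamB
  rw [pvDelayed_append l v 0, pvDelayed_append l v 1, pvDelayed_append l v 2,
      pvDelayed_append l v 3, pvDelayed_append l v 6]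
  rw [pvXor2_append _ _ _ _ (by rw [pvDelayed_length, pvDelayed_length]),
      pvXor2_append _ _ _ _ (by rw [pvXor2_length, pvDelayed_length, pvDelayed_length, pvDelayed_length]; omega),
      pvXor2_append _ _ _ _ (by rw [pvXor2_length, pvXor2_length, pvDelayed_length, pvDelayed_length, pvDelayed_length, pvDelayed_length]; omega),
      pvXor2_append _ _ _ _ (by rw [pvXor2_length, pvXor2_length, pvXor2_length, pvDelayed_length, pvDelayed_length, pvDelayed_length, pvDelayed_length, pvDelayed_length]; omega)]
  norm_num

lemma pvInterleave_length (u w : List Int) :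
    (pvInterleave u w).length = 2 * min u.length w.length := by
  unfold pvInterleave
  rw [pvPairFlat_len, List.length_zip]

-- the staged pipeline equals the reference per-index loop
lemma pvBridge (PA PB : List Int) (L : Int) (hL : 0 < L) (input : List Int) :
    (PySem.List.enumerate (pvInterleave (pvStreamA input) (pvStreamB input)) 0).filterMap
        (fun p => if PySem.List.pyGetD (pvKeep PA PB L) (PySem.Int.mod p.1 (2 * L)) 0 ≠ 0 then some p.2 else none)
      = (PySem.List.pyRange 0 (input.length : Int) 1).foldl (pvStepB input PA PB L) [] := by
  induction input using List.reverseRecOn with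
  | nil =>
      simp [pvStreamA, pvStreamB, pvDelayed_eq_take, pvXor2, pvInterleave,
        PySem.List.pyRange_one_eq_nil (le_refl 0)]
  | append_singleton l v ih =>
      have hn : (0 : Int) ≤ (l.length : Int) := by positivity
      have hx : ∀ k : Int, k < (l.length : Int) → pvX (l ++ [v]) k = pvX l k :=
        fun k hk => pvX_append l v k hk
      have hlenI : (pvInterleave (pvStreamA l) (pvStreamB l)).length = 2 * l.length := by
        rw [pvInterleave_length, pvStreamA_length, pvStreamB_length, min_self]
      rw [pvStreamA_append, pvStreamB_append,
          pvInterleave_append _ _ _ _ (by rw [pvStreamA_length, pvStreamB_length])]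
      rw [PySem.List.enumerate_append, List.filterMap_append, ih]
      -- the two freshly appended enumerate entries
      rw [PySem.List.enumerate_cons, PySem.List.enumerate_cons, PySem.List.enumerate_nil]
      have hkey : (0 : Int) + (pvInterleave (pvStreamA l) (pvStreamB l)).length
          = 2 * (l.length : Int) := by
        rw [hlenI]; omega
      rw [hkey]
      have hm0 : 0 ≤ PySem.Int.mod (l.length : Int) L := PySem.Int.mod_nonneg _ hL
      have hmL : PySem.Int.mod (l.length : Int) L < L := PySem.Int.mod_lt _ hL
      -- right-hand side: split the range at the last index
      have hlen1 : ((l ++ [v]).length : Int) = (l.length : Int) + 1 := by simp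
      rw [hlen1, PySem.List.pyRange_one_succ_right hn, List.foldl_append]
      rw [PySem.List.foldl_congr_mem (PySem.List.pyRange 0 (l.length : Int) 1)
        (pvStepB (l ++ [v]) PA PB L) (pvStepB l PA PB L) []
        (by
          intro acc i hi
          rcases (PySem.List.mem_pyRange_one).1 hi with ⟨hi0, hi1⟩
          unfold pvStepB
          rw [hx i hi1, hx (i - 1) (by omega), hx (i - 2) (by omega), hx (i - 3) (by omega),
            hx (i - 5) (by omega), hx (i - 6) (by omega)])]
      simp only [List.foldl_cons, List.foldl_nil]
      -- evaluate the filterMap on the two new entries and match the reference step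
      simp only [List.filterMap_cons, List.filterMap_nil]
      rw [show (2 * (l.length : Int) + 1) = 2 * (l.length : Int) + 1 from rfl]
      rw [pvMod_double _ _ hL, pvMod_double_succ _ _ hL,
          pvKeep_even PA PB L _ hm0 hmL, pvKeep_odd PA PB L _ hm0 hmL]
      generalize List.foldl (pvStepB l PA PB L) [] (PySem.List.pyRange 0 (l.length : Int)) = out
      unfold pvStepB
      simp only [show ∀ (xs : List Int) (i : Int),
          PySem.List.pyGetD xs i 0 = (PySem.List.pyGet? xs i).getD 0 from fun _ _ => rfl]
      split_ifs <;> simp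

-- ===== VERDICT (by name: the statement is the Claim_ definition above) =====
theorem BCCEncoder_spec : Claim_equal_BCCEncoder := by
  intro input rate _
  unfold Spec_BCCEncoder BCCEncoder BCCEncoder_alt
  rw [pvMasks_eq]
  unfold pvMasksB
  by_cases h34 : rate = "3/4"
  · rw [if_pos h34]
    rw [congrArg (fun s => s.2.2)
      (pvCore [1, 1, 0, 1, 1, 0, 1, 1, 0] [1, 0, 1, 1, 0, 1, 1, 0, 1] 8
        (by decide) (by decide) (by decide) (by decide) (by decide) input)]
    exact (pvBridge _ _ 8 (by decide) input).symm
  · rw [if_neg h34]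
    by_cases h23 : rate = "2/3"
    · rw [if_pos h23]
      rw [congrArg (fun s => s.2.2)
        (pvCore [1, 1, 1, 1, 1, 1] [1, 0, 1, 0, 1, 0] 6
          (by decide) (by decide) (by decide) (by decide) (by decide) input)]
      exact (pvBridge _ _ 6 (by decide) input).symm
    · rw [if_neg h23]
      rw [congrArg (fun s => s.2.2)
        (pvCore [1] [1] 1 (by decide) (by decide) (by decide) (by decide) (by decide) input)]
      exact (pvBridge _ _ 1 (by decide) input).symm
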